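-- pv_equiv track=rewrite | github.com/Andrii-hotfix/Math-Algorithms | Algorithms.py | lambda_matrix2
-- ===== SOURCE A (Python) =====
-- def lambda_matrix2(mod):
-- 	l_m = []
-- 	for i in range(mod):
-- 		line = []
-- 		for j in range(mod):
-- 			if (2**i+2**j)%(2*mod+1)==2*mod or (2**i+2**j)%(2*mod+1)==1 or (2**i-2**j)%(2*mod+1)==2*mod or (2**i-2**j)%(2*mod+1)==1:
-- 				line.append(1)
-- 			else:
-- 				line.append(0)
-- 		l_m.append(line)
-- 	return l_m
-- ===== SOURCE B (Python) =====
-- def lambda_matrix2(mod):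
--     # Inverted strategy: instead of testing each cell, index columns by their
--     # power residue and, for each row, mark exactly the columns whose residue
--     # is one of the four solutions of the sum/difference congruences.
--     m = 2 * mod + 1
--     pw = [pow(2, i, m) for i in range(mod)]
--     idx = {}
--     for j, p in enumerate(pw):
--         idx.setdefault(p, []).append(j)
--     out = []
--     for p in pw:
--         row = [0] * mod
--         for t in ((1 - p) % m, (-1 - p) % m, (p - 1) % m, (p + 1) % m):
--             for j in idx.get(t, ()):
--                 row[j] = 1
--         out.append(row)
--     return out
-- ===== Notes on version B (the rewrite author's own statement) =====
-- stated objective: faster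
-- what changed: B inverts the computation: it builds a dictionary from residue pow(2,j,m) to the columns carrying it, then for each row solves the four congruences (sum or difference of the two power residues congruent to plus or minus one mod m) for the column residue and marks only the looked-up columns in a zero row, so A's per-cell big-integer test disappears entirely.
import Mathlib
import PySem

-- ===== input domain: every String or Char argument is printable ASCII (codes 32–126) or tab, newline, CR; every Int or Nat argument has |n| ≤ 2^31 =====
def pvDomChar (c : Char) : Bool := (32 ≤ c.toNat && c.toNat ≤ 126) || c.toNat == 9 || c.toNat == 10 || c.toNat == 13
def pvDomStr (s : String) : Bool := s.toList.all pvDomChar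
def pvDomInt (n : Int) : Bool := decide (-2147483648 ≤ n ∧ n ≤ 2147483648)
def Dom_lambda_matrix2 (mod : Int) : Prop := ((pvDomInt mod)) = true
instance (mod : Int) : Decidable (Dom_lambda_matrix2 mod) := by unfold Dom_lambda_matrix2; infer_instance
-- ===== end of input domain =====

-- B indexes columns by their power residue in a dict and marks, per row, only the
-- columns solving the four target congruences — instead of A's per-cell big-power test.


-- ===== PORT A =====
def lambda_matrix2 (mod : Int) : List (List Int) :=
  (PySem.List.pyRange 0 mod 1).foldl (fun l_m i =>
    l_m ++ [(PySem.List.pyRange 0 mod 1).foldl (fun line j =>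
      line ++ [if PySem.Int.mod ((2:Int) ^ i.toNat + 2 ^ j.toNat) (2 * mod + 1) = 2 * mod ∨
                  PySem.Int.mod ((2:Int) ^ i.toNat + 2 ^ j.toNat) (2 * mod + 1) = 1 ∨
                  PySem.Int.mod ((2:Int) ^ i.toNat - 2 ^ j.toNat) (2 * mod + 1) = 2 * mod ∨
                  PySem.Int.mod ((2:Int) ^ i.toNat - 2 ^ j.toNat) (2 * mod + 1) = 1
               then (1 : Int) else 0]) []]) []

-- ===== PORT B =====
-- mirrors Source B: residue table, a dict residue -> columns, then per row mark the
-- columns found at the four target residues in a zero row (row[j] = 1 is set, j ≥ 0)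
def lambda_matrix2_alt (mod : Int) : List (List Int) :=
  let m : Int := 2 * mod + 1
  let pw : List Int := (PySem.List.pyRange 0 mod 1).map (fun i => PySem.Int.powMod 2 i.toNat m)
  let idx : PySem.Dict Int (List Int) :=
    (PySem.List.enumerate pw 0).foldl
      (fun d jp => d.modify jp.2 [] (fun l => l ++ [jp.1])) PySem.Dict.empty
  pw.foldl (fun out p =>
    out ++ [([PySem.Int.mod (1 - p) m, PySem.Int.mod (-1 - p) m,
              PySem.Int.mod (p - 1) m, PySem.Int.mod (p + 1) m]).foldl
      (fun row t => (idx.getD t []).foldl (fun r j => r.set j.toNat 1) row)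
      (List.replicate mod.toNat 0)]) []

-- ===== PRECONDITION & SPEC =====
def Spec_lambda_matrix2 (mod : Int) (out : List (List Int)) : Prop := out = lambda_matrix2_alt mod
instance (mod : Int) (out : List (List Int)) : Decidable (Spec_lambda_matrix2 mod out) := by unfold Spec_lambda_matrix2; infer_instance

-- ===== CLAIM (what is proved, stated in full; the proofs are below) =====
def Claim_equal_lambda_matrix2 : Prop := ∀ (mod : Int), Dom_lambda_matrix2 mod → Spec_lambda_matrix2 mod (lambda_matrix2 mod)

-- ===== LEMMAS AND PROOFS =====

-- A's (and B's outer) append-accumulating loop is a map.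
theorem pv_foldl_snoc {α β : Type} (f : α → β) : ∀ (xs : List α) (acc : List β),
    xs.foldl (fun l x => l ++ [f x]) acc = acc ++ xs.map f := by
  intro xs
  induction xs with
  | nil => intro acc; simp
  | cons x xs ih => intro acc; simp [List.foldl, ih]

-- the grouping loop: looking up r in the built dict yields the first components of
-- exactly the pairs whose second component is r, in order
theorem pv_group : ∀ (L : List (Int × Int)) (d : PySem.Dict Int (List Int)) (r : Int),
    (L.foldl (fun d jp => d.modify jp.2 [] (fun l => l ++ [jp.1])) d).getD r []
      = d.getD r [] ++ (L.filter (fun jp => jp.2 == r)).map Prod.fst := by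
  intro L
  induction L with
  | nil => intro d r; simp
  | cons jp L ih =>
      intro d r
      by_cases h : jp.2 = r
      · simp only [List.foldl_cons, ih, List.filter_cons, h, beq_self_eq_true, if_pos, List.map_cons]
        rw [PySem.Dict.getD_modify_self]
        simp
      · simp only [List.foldl_cons, ih, List.filter_cons]
        rw [PySem.Dict.getD_modify_of_ne _ _ _ (fun he => h he.symm)]
        simp [h]

-- membership in the grouped column list
theorem pv_mem_group : ∀ (pw : List Int) (s r j : Int),
    (j ∈ ((PySem.List.enumerate pw s).filter (fun jp => jp.2 == r)).map Prod.fst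
      ↔ ∃ k : Nat, pw[k]? = some r ∧ j = s + k) := by
  intro pw
  induction pw with
  | nil => intro s r j; simp [PySem.List.enumerate]
  | cons x xs ih =>
      intro s r j
      rw [PySem.List.enumerate_cons]
      by_cases h : x = r
      · subst h
        simp only [List.filter_cons, beq_self_eq_true, if_pos, List.map_cons, List.mem_cons, ih]
        constructor
        · rintro (rfl | ⟨k, hk, rfl⟩)
          · exact ⟨0, by simp, by simp⟩
          · exact ⟨k + 1, by simpa using hk, by push_cast; ring⟩
        · rintro ⟨k, hk, rfl⟩
          cases k with
          | zero => left; simp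
          | succ k => right; exact ⟨k, by simpa using hk, by push_cast; ring⟩
      · rw [List.filter_cons_of_neg (by simpa using h)]
        rw [ih]
        constructor
        · rintro ⟨k, hk, rfl⟩
          exact ⟨k + 1, by simpa using hk, by push_cast; ring⟩
        · rintro ⟨k, hk, rfl⟩
          cases k with
          | zero => simp at hk; exact absurd hk h
          | succ k => exact ⟨k, by simpa using hk, by push_cast; ring⟩

-- marking preserves length
theorem pv_mark_length : ∀ (cols : List Int) (row : List Int),
    (cols.foldl (fun r j => r.set j.toNat 1) row).length = row.length := by
  intro cols
  induction cols with
  | nil => intro row; rfl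
  | cons c cols ih => intro row; simp [List.foldl, ih]

-- the marked row, pointwise
theorem pv_mark_get : ∀ (cols : List Int) (row : List Int) (n : Nat), n < row.length →
    (cols.foldl (fun r j => r.set j.toNat 1) row)[n]? =
      if ∃ j ∈ cols, j.toNat = n then some 1 else row[n]? := by
  intro cols
  induction cols with
  | nil => intro row n _; simp
  | cons c cols ih =>
      intro row n hn
      rw [List.foldl_cons, ih _ _ (by simpa using hn)]
      by_cases htail : ∃ j ∈ cols, j.toNat = n
      · simp [htail]
      · by_cases hc : c.toNat = n
        · simp [hc, htail, hn]
        · simp [hc, htail]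

-- nested marking over the target list flattens
theorem pv_mark_flat : ∀ (ts : List Int) (g : Int → List Int) (row : List Int),
    ts.foldl (fun r t => (g t).foldl (fun r j => r.set j.toNat 1) r) row
      = (ts.flatMap g).foldl (fun r j => r.set j.toNat 1) row := by
  intro ts g
  induction ts with
  | nil => intro row; rfl
  | cons t ts ih => intro row; simp [List.foldl_append, ih]

-- solving (a + x) ≡ c and (a - x) ≡ c (mod m) for x in [0, m)
theorem pv_shift_add (a c x m : Int) (hx0 : 0 ≤ x) (hx : x < m) :
    ((a + x)% m = c % m ↔ x = (c - a) % m) := by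
  constructor
  · intro h
    have h2 : x % m = (c - a) % m := by
      have := Int.ModEq.sub (h : Int.ModEq m (a + x) c) (Int.ModEq.refl a)
      simpa [show a + x - a = x from by ring] using this
    rwa [Int.emod_eq_of_lt hx0 hx] at h2
  · rintro rfl
    have h1 : Int.ModEq m ((c - a) % m) (c - a) := Int.emod_emod_of_dvd _ dvd_rfl
    have := Int.ModEq.add_left a h1
    simpa [show a + (c - a) = c from by ring] using (this : Int.ModEq m _ _)

theorem pv_shift_sub (a c x m : Int) (hx0 : 0 ≤ x) (hx : x < m) :
    ((a - x)% m = c % m ↔ x = (a - c) % m) := by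
  constructor
  · intro h
    have h2 : x % m = (a - c) % m := by
      have := Int.ModEq.sub (Int.ModEq.refl a) (h : Int.ModEq m (a - x) c)
      simpa [show a - (a - x) = x from by ring] using this
    rwa [Int.emod_eq_of_lt hx0 hx] at h2
  · rintro rfl
    have h1 : Int.ModEq m ((a - c) % m) (a - c) := Int.emod_emod_of_dvd _ dvd_rfl
    have := Int.ModEq.sub (Int.ModEq.refl a) h1
    simpa [show a - (a - c) = c from by ring] using (this : Int.ModEq m _ _)


-- the dict built by the grouping loop, looked up
theorem pv_idx (pw : List Int) (t : Int) :
    (((PySem.List.enumerate pw 0).foldl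
        (fun d jp => d.modify jp.2 [] (fun l => l ++ [jp.1])) PySem.Dict.empty).getD t [])
      = ((PySem.List.enumerate pw 0).filter (fun jp => jp.2 == t)).map Prod.fst := by
  rw [pv_group]
  simp [PySem.Dict.empty, PySem.Dict.getD, PySem.Dict.get?]

-- one cell: A's four-way test on the full powers is membership of the column
-- residue in B's four target residues
set_option maxHeartbeats 1000000 in
theorem pv_cell (mod : Int) (hmod : 1 ≤ mod) (a b : Nat) :
    ((PySem.Int.mod ((2:Int) ^ a + 2 ^ b) (2*mod+1) = 2*mod ∨
      PySem.Int.mod ((2:Int) ^ a + 2 ^ b) (2*mod+1) = 1 ∨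
      PySem.Int.mod ((2:Int) ^ a - 2 ^ b) (2*mod+1) = 2*mod ∨
      PySem.Int.mod ((2:Int) ^ a - 2 ^ b) (2*mod+1) = 1)
     ↔ PySem.Int.powMod 2 b (2*mod+1) ∈
        [PySem.Int.mod (1 - PySem.Int.powMod 2 a (2*mod+1)) (2*mod+1),
         PySem.Int.mod (-1 - PySem.Int.powMod 2 a (2*mod+1)) (2*mod+1),
         PySem.Int.mod (PySem.Int.powMod 2 a (2*mod+1) - 1) (2*mod+1),
         PySem.Int.mod (PySem.Int.powMod 2 a (2*mod+1) + 1) (2*mod+1)]) := by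
  have hm : (0:Int) < 2*mod+1 := by omega
  simp only [PySem.Int.powMod, PySem.Int.mod_eq_emod_of_pos hm, List.mem_cons,
    List.not_mem_nil, or_false]
  have hq0 : (0:Int) ≤ 2 ^ b % (2*mod+1) := Int.emod_nonneg _ (by omega)
  have hqm : (2:Int) ^ b % (2*mod+1) < 2*mod+1 := Int.emod_lt_of_pos _ hm
  have e1 : (-1:Int) % (2*mod+1) = 2*mod := by
    rw [show (-1:Int) = (2*mod+1-1) - (2*mod+1) from by ring, Int.sub_emod_right,
      Int.emod_eq_of_lt (by omega) (by omega)]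
    omega
  have e2 : (1:Int) % (2*mod+1) = 1 := Int.emod_eq_of_lt (by omega) (by omega)
  have c1 := pv_shift_add ((2:Int)^a % (2*mod+1)) (-1) ((2:Int)^b % (2*mod+1)) (2*mod+1) hq0 hqm
  rw [e1] at c1
  have c2 := pv_shift_add ((2:Int)^a % (2*mod+1)) 1 ((2:Int)^b % (2*mod+1)) (2*mod+1) hq0 hqm
  rw [e2] at c2
  have c3 := pv_shift_sub ((2:Int)^a % (2*mod+1)) (-1) ((2:Int)^b % (2*mod+1)) (2*mod+1) hq0 hqm
  rw [e1, show ((2:Int)^a % (2*mod+1) - -1) = 2^a % (2*mod+1) + 1 from by ring] at c3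
  have c4 := pv_shift_sub ((2:Int)^a % (2*mod+1)) 1 ((2:Int)^b % (2*mod+1)) (2*mod+1) hq0 hqm
  rw [e2] at c4
  rw [Int.add_emod ((2:Int)^a) (2^b), Int.sub_emod ((2:Int)^a) (2^b), c1, c2, c3, c4]
  tauto

-- one marked row, read at a valid column n
theorem pv_row (mod : Int) (pw : List Int)
    (hpw : ∀ k : Nat, k < mod.toNat → pw[k]? = some (PySem.Int.powMod 2 k (2*mod+1)))
    (ts : List Int) (n : Nat) (hn : n < mod.toNat) :
    ((ts.flatMap (fun t => ((PySem.List.enumerate pw 0).foldl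
        (fun d jp => d.modify jp.2 [] (fun l => l ++ [jp.1])) PySem.Dict.empty).getD t [])).foldl
      (fun r j => r.set j.toNat 1) (List.replicate mod.toNat (0:Int)))[n]?
      = some (if PySem.Int.powMod 2 n (2*mod+1) ∈ ts then (1:Int) else 0) := by
  rw [pv_mark_get _ _ n (by simpa using hn)]
  have hcond : (∃ j ∈ ts.flatMap (fun t => ((PySem.List.enumerate pw 0).foldl
        (fun d jp => d.modify jp.2 [] (fun l => l ++ [jp.1])) PySem.Dict.empty).getD t []),
        j.toNat = n) ↔ PySem.Int.powMod 2 n (2*mod+1) ∈ ts := by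
    simp only [List.mem_flatMap, pv_idx]
    constructor
    · rintro ⟨j, ⟨t, ht, hj⟩, hjn⟩
      rw [pv_mem_group] at hj
      obtain ⟨k, hk, rfl⟩ := hj
      have hk' : k < mod.toNat := by
        have := List.getElem?_eq_some_iff.mp hk
        omega
      rw [hpw k hk'] at hk
      have : k = n := by omega
      subst this
      cases hk
      exact ht
    · intro h
      refine ⟨(n : Int), ⟨PySem.Int.powMod 2 n (2*mod+1), h, ?_⟩, by simp⟩
      rw [pv_mem_group]
      exact ⟨n, hpw n hn, by simp⟩
  by_cases h : PySem.Int.powMod 2 n (2*mod+1) ∈ ts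
  · rw [if_pos (hcond.mpr h), if_pos h]
  · rw [if_neg (fun hx => h (hcond.mp hx)), if_neg h, List.getElem?_replicate, if_pos hn]

-- ===== VERDICT (by name: the statement is the Claim_ definition above) =====
theorem lambda_matrix2_spec : Claim_equal_lambda_matrix2 := by
  intro mod _
  unfold Spec_lambda_matrix2 lambda_matrix2 lambda_matrix2_alt
  simp only [pv_foldl_snoc, List.nil_append, List.map_map]
  refine List.map_congr_left ?_
  intro i hi
  rw [PySem.List.mem_pyRange_one] at hi
  have hmod : 1 ≤ mod := by omega
  simp only [Function.comp]
  refine List.ext_getElem? ?_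
  intro n
  have hpw : ∀ k : Nat, k < mod.toNat →
      ((PySem.List.pyRange 0 mod 1).map
        (fun i => PySem.Int.powMod 2 i.toNat (2*mod+1)))[k]?
        = some (PySem.Int.powMod 2 k (2*mod+1)) := by
    intro k hk
    rw [List.getElem?_map, PySem.List.getElem?_pyRange_one]
    simp [hk]
  by_cases hn : n < mod.toNat
  · rw [pv_mark_flat, pv_row mod _ hpw _ n hn]
    rw [List.getElem?_map, PySem.List.getElem?_pyRange_one]
    rw [if_pos (by omega : n < (mod - 0).toNat)]
    simp only [Option.map_some, zero_add, Int.toNat_natCast]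
    exact congrArg some (if_congr (pv_cell mod hmod i.toNat n) rfl rfl)
  · rw [List.getElem?_eq_none (by simp [PySem.List.length_pyRange_one]; omega),
      List.getElem?_eq_none (by rw [pv_mark_flat, pv_mark_length]; simp; omega)]
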